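-- pv_equiv track=rewrite | github.com/maikombecker/sublexical | lib/py_utils/feature_finder_py3.py | find_shared_features
-- ===== SOURCE A (Python) =====
-- def find_shared_features(segments, f_dict):
--     f_lists = []
--
--     for segment in segments:
--         f_list = []
--         for feature in f_dict[segment]:
--             f_list.append((f_dict[segment][feature], feature))
--         f_lists.append(f_list)
--
--     return set(f_lists[0]).intersection(*f_lists[1:])
-- ===== SOURCE B (Python) =====
-- def find_shared_features(segments, f_dict):
--     # Tally: count in how many segments each (value, feature) pair occurs;
--     # the shared pairs are exactly those counted once per segment.
--     counts = {}
--     for segment in segments: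
--         for pair in {(f_dict[segment][f], f) for f in f_dict[segment]}:
--             counts[pair] = counts.get(pair, 0) + 1
--     return {pair for pair, c in counts.items() if c == len(segments)}
-- ===== Notes on version B (the rewrite author's own statement) =====
-- stated objective: alternative
-- what changed: B replaces set intersection entirely by a tally: one counting dict over all segments' (value,feature) pairs, then keeps the pairs whose count equals the number of segments.
import Mathlib
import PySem

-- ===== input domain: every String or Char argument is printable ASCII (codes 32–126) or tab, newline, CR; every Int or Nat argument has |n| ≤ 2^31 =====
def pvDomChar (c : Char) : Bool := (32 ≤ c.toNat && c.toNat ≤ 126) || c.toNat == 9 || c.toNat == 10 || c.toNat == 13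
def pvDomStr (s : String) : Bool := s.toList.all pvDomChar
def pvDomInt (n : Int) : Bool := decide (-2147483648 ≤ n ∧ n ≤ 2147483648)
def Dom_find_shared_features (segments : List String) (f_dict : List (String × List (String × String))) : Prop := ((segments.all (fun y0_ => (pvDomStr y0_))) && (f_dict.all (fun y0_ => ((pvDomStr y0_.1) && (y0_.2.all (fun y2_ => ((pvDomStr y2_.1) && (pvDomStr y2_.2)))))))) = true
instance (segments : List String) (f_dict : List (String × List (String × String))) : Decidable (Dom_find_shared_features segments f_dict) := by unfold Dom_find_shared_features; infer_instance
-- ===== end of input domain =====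

-- B replaces the set-intersection algorithm by a tally: one counting dict over all
-- segments' (value, feature) pairs, keeping the pairs counted once per segment
-- (objective: alternative; same asymptotic cost).

-- ===== PORT A =====
-- inner loop of A: for feature in f_dict[segment]: f_list.append((f_dict[segment][feature], feature))
def pvFListA (d : PySem.Dict String String) : List (String × String) :=
  (PySem.Dict.keys d).foldl (fun acc f => acc ++ [(PySem.Dict.getD d f "", f)]) []

def find_shared_features (segments : List String) (f_dict : List (String × List (String × String))) : List (String × String) :=
  -- f_lists built segment by segment (getD []: the missing-key case is excluded by Pre_)
  let f_lists : List (List (String × String)) :=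
    segments.foldl (fun acc seg => acc ++ [pvFListA (PySem.Dict.mk (PySem.Dict.getD (PySem.Dict.mk f_dict) seg []))]) []
  -- set(f_lists[0]).intersection(*f_lists[1:]) : elements of the first set lying in every other list
  match f_lists with
  | [] => []   -- IndexError in Python, excluded by Pre_
  | h :: t => (PySem.Set.ofList h).filter (fun x => t.all (fun l => l.contains x))

-- ===== PORT B =====
-- the set comprehension {(f_dict[segment][f], f) for f in f_dict[segment]}
def pvSegSetB (f_dict : List (String × List (String × String))) (seg : String) : PySem.Set (String × String) :=
  PySem.Set.ofList ((PySem.Dict.keys (PySem.Dict.mk (PySem.Dict.getD (PySem.Dict.mk f_dict) seg []))).map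
    (fun f => (PySem.Dict.getD (PySem.Dict.mk (PySem.Dict.getD (PySem.Dict.mk f_dict) seg [])) f "", f)))

def find_shared_features_alt (segments : List String) (f_dict : List (String × List (String × String))) : List (String × String) :=
  -- counts[pair] = counts.get(pair, 0) + 1, over every segment's pair set
  let counts : PySem.Dict (String × String) Int :=
    segments.foldl (fun counts seg =>
      (pvSegSetB f_dict seg).foldl (fun c pair => c.insert pair (c.getD pair 0 + 1)) counts)
      PySem.Dict.empty
  -- {pair for pair, c in counts.items() if c == len(segments)}
  PySem.Set.ofList (((counts.items).filter (fun pc => pc.2 == (segments.length : Int))).map (·.1))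

-- ===== PRECONDITION & SPEC =====
-- Pre_ excludes exactly the Python exceptions: IndexError on empty segments, KeyError on a segment missing from f_dict.
def Pre_find_shared_features (segments : List String) (f_dict : List (String × List (String × String))) : Prop :=
  segments ≠ [] ∧ ∀ s ∈ segments, s ∈ PySem.Dict.keys (PySem.Dict.mk f_dict)
instance (segments : List String) (f_dict : List (String × List (String × String))) : Decidable (Pre_find_shared_features segments f_dict) := by unfold Pre_find_shared_features; infer_instance

def pvWitness_find_shared_features : List String × (List (String × List (String × String))) :=
  (["a", "b"], [("a", [("high", "+"), ("back", "-")]), ("b", [("high", "+")])])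

def Spec_find_shared_features (segments : List String) (f_dict : List (String × List (String × String))) (out : List (String × String)) : Prop := out = find_shared_features_alt segments f_dict
instance (segments : List String) (f_dict : List (String × List (String × String))) (out : List (String × String)) : Decidable (Spec_find_shared_features segments f_dict out) := by unfold Spec_find_shared_features; infer_instance

-- ===== CLAIM (what is proved, stated in full; the proofs are below) =====
def Claim_equal_find_shared_features : Prop := ∀ (segments : List String) (f_dict : List (String × List (String × String))), Dom_find_shared_features segments f_dict → Pre_find_shared_features segments f_dict → Spec_find_shared_features segments f_dict (find_shared_features segments f_dict)
-- ===== LEMMAS AND PROOFS =====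

-- A's inner loop builds the list whose dedup is B's comprehension set
theorem pv_ofList_flist_eq (f_dict : List (String × List (String × String))) (seg : String) :
    PySem.Set.ofList (pvFListA (PySem.Dict.mk (PySem.Dict.getD (PySem.Dict.mk f_dict) seg []))) = pvSegSetB f_dict seg := by
  unfold pvFListA pvSegSetB
  rw [PySem.List.foldl_append_singleton_eq_map, List.nil_append]

-- a nested per-segment counting loop is the counting loop over the flattened pair list
theorem pv_foldl_foldl_eq_flatMap {α β γ : Type} (g : β → List α) (f : γ → α → γ) (l : List β) (init : γ) :
    l.foldl (fun acc x => (g x).foldl f acc) init = (l.flatMap g).foldl f init := by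
  induction l generalizing init with
  | nil => rfl
  | cons x xs ih => simp [List.foldl_append, ih]

-- count in the flattened list = number of segments whose (duplicate-free) pair set contains p
theorem pv_count_flatMap {α β : Type} [BEq α] [LawfulBEq α] (g : β → List α) (l : List β)
    (hnd : ∀ s ∈ l, (g s).Nodup) (p : α) :
    (l.flatMap g).count p = l.countP (fun s => (g s).contains p) := by
  induction l with
  | nil => rfl
  | cons x xs ih =>
      simp only [List.flatMap_cons, List.count_append, List.countP_cons]
      rw [ih (fun s hs => hnd s (List.mem_cons_of_mem _ hs))]
      by_cases hx : p ∈ g x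
      · rw [List.count_eq_one_of_mem (hnd x (List.mem_cons_self)) hx]
        simp [hx]; omega
      · rw [List.count_eq_zero_of_not_mem hx]
        simp [hx]

-- Set.update appends only fresh elements
theorem pv_update_append {α : Type} [BEq α] [LawfulBEq α] (a b : List α) :
    ∃ d : List α, PySem.Set.update a b = a ++ d ∧ ∀ x ∈ d, x ∉ a := by
  induction b generalizing a with
  | nil => exact ⟨[], by simp [PySem.Set.update], by simp⟩
  | cons y ys ih =>
      by_cases hy : y ∈ a
      · obtain ⟨d, hd, hfresh⟩ := ih a
        refine ⟨d, ?_, hfresh⟩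
        simpa [PySem.Set.update, PySem.Set.add, List.contains_eq_mem, hy] using hd
      · obtain ⟨d, hd, hfresh⟩ := ih (a ++ [y])
        refine ⟨y :: d, ?_, ?_⟩
        · simpa [PySem.Set.update, PySem.Set.add, List.contains_eq_mem, hy] using hd
        · intro x hx
          rcases List.mem_cons.mp hx with hx | hx
          · simpa [hx] using hy
          · intro hxa
            exact hfresh x hx (List.mem_append_left _ hxa)


-- dedup of a concatenation extends the dedup of its head
theorem pv_ofList_append {α : Type} [BEq α] (a b : List α) :
    PySem.Set.ofList (a ++ b) = PySem.Set.update (PySem.Set.ofList a) b := by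
  simp [PySem.Set.ofList, PySem.Set.update, List.foldl_append]

-- ===== VERDICT (by name: the statement is the Claim_ definition above) =====
theorem find_shared_features_spec : Claim_equal_find_shared_features := by
  intro segments f_dict _ hpre
  unfold Spec_find_shared_features find_shared_features find_shared_features_alt
  cases segments with
  | nil => exact absurd rfl hpre.1
  | cons s0 rest =>
    simp only [PySem.List.foldl_append_singleton_eq_map, List.nil_append, List.map_cons,
      pv_foldl_foldl_eq_flatMap]
    have hndseg : ∀ seg, (pvSegSetB f_dict seg).Nodup := by
      intro seg; unfold pvSegSetB; exact PySem.Set.nodup_ofList _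
    have hcount := pv_count_flatMap (pvSegSetB f_dict) (s0 :: rest) (fun s _ => hndseg s)
    have hiff : ∀ k, List.count k ((s0 :: rest).flatMap (pvSegSetB f_dict)) = rest.length + 1 ↔
        (List.contains (pvSegSetB f_dict s0) k = true ∧
          ∀ s ∈ rest, List.contains (pvSegSetB f_dict s) k = true) := by
      intro k
      rw [hcount k, List.countP_cons]
      have hle := List.countP_le_length (p := fun s => List.contains (pvSegSetB f_dict s) k) (l := rest)
      rw [← List.countP_eq_length (p := fun s => List.contains (pvSegSetB f_dict s) k) (l := rest)]
      by_cases hk : List.contains (pvSegSetB f_dict s0) k = true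
      · rw [if_pos hk]
        simp only [hk, true_and]
        omega
      · rw [if_neg hk]
        simp only [Bool.not_eq_true] at hk
        simp only [hk, Bool.false_eq_true, false_and, iff_false]
        omega
    have hnd : ((( (s0 :: rest).flatMap (pvSegSetB f_dict)).foldl
        (fun c pair => c.insert pair (c.getD pair 0 + 1))
        (PySem.Dict.empty : PySem.Dict (String × String) Int)).keys).Nodup :=
      PySem.Dict.nodup_keys_foldl_insert _ _ _ PySem.Dict.nodup_keys_empty
    rw [PySem.Dict.items_eq_map_keys _ hnd 0, List.filter_map, List.map_map]
    have hkeys : (((s0 :: rest).flatMap (pvSegSetB f_dict)).foldl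
        (fun c pair => c.insert pair (c.getD pair 0 + 1))
        (PySem.Dict.empty : PySem.Dict (String × String) Int)).keys
        = PySem.Set.ofList ((s0 :: rest).flatMap (pvSegSetB f_dict)) := by
      rw [PySem.Dict.keys_foldl_insert]
      simp [PySem.Dict.keys_empty, PySem.Set.update, PySem.Set.ofList]
    have hproj : ((fun pc : (String × String) × Int => pc.1) ∘ fun k =>
        (k, (((s0 :: rest).flatMap (pvSegSetB f_dict)).foldl
          (fun c pair => c.insert pair (c.getD pair 0 + 1))
          (PySem.Dict.empty : PySem.Dict (String × String) Int)).getD k 0)) = id := by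
      funext k; rfl
    have hpred : ((fun pc : (String × String) × Int => pc.2 == ((s0 :: rest).length : Int))
        ∘ fun k => (k, (((s0 :: rest).flatMap (pvSegSetB f_dict)).foldl
          (fun c pair => c.insert pair (c.getD pair 0 + 1))
          (PySem.Dict.empty : PySem.Dict (String × String) Int)).getD k 0))
        = fun k => decide (List.count k ((s0 :: rest).flatMap (pvSegSetB f_dict)) = rest.length + 1) := by
      funext k
      simp only [Function.comp, PySem.Dict.getD_foldl_insert_add_one, PySem.Dict.getD_empty,
        zero_add, List.length_cons]
      rw [Bool.eq_iff_iff, beq_iff_eq, decide_eq_true_eq]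
      omega
    rw [hproj, List.map_id, hpred, hkeys]
    -- split the dedup of the flattened list at the first segment's (duplicate-free) set
    obtain ⟨d, hd, hfresh⟩ := pv_update_append (pvSegSetB f_dict s0) (rest.flatMap (pvSegSetB f_dict))
    have hsplit : PySem.Set.ofList ((s0 :: rest).flatMap (pvSegSetB f_dict))
        = pvSegSetB f_dict s0 ++ d := by
      rw [List.flatMap_cons, pv_ofList_append,
        PySem.Set.ofList_eq_self_of_nodup _ (hndseg s0)]
      exact hd
    rw [hsplit, List.filter_append]
    -- no fresh (later-only) pair can reach the full count
    have hdnil : d.filter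
        (fun k => decide (List.count k ((s0 :: rest).flatMap (pvSegSetB f_dict)) = rest.length + 1)) = [] := by
      rw [List.filter_eq_nil_iff]
      intro k hk
      simp only [decide_eq_true_eq]
      intro hck
      exact hfresh k hk (by simpa [List.contains_eq_mem] using ((hiff k).mp hck).1)
    rw [hdnil, List.append_nil,
      PySem.Set.ofList_eq_self_of_nodup _ ((hndseg s0).filter _), ← pv_ofList_flist_eq]
    -- on the first segment's set the two predicates coincide
    refine List.filter_congr ?_
    intro x hx
    have hx0 : (pvSegSetB f_dict s0).contains x = true := by
      rw [← pv_ofList_flist_eq]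
      simpa [List.contains_eq_mem] using hx
    simp only [List.all_map]
    rw [Bool.eq_iff_iff]
    simp only [List.all_eq_true, decide_eq_true_eq]
    rw [hiff x]
    have hmemiff : ∀ s, (pvFListA (PySem.Dict.mk (PySem.Dict.getD (PySem.Dict.mk f_dict) s []))).contains x = true
        ↔ (pvSegSetB f_dict s).contains x = true := by
      intro s
      rw [← pv_ofList_flist_eq]
      simp [List.contains_eq_mem, PySem.Set.mem_ofList]
    constructor
    · intro h
      exact ⟨hx0, fun s hs => (hmemiff s).mp (h s hs)⟩
    · rintro ⟨-, hall⟩ s hs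
      exact (hmemiff s).mpr (hall s hs)
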